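-- pv_equiv track=rewrite | github.com/inevitablesale/hubspot-any-form-recovery-service | main.py | extract_submission_email_and_fields
-- ===== SOURCE A (Python) =====
-- from typing import Dict, Any, Optional, List, Tuple
--
-- def extract_submission_email_and_fields(
--     submission: Dict[str, Any]
-- ) -> Tuple[Optional[str], Dict[str, Any]]:
--     """
--     Extract email and form field values from a raw submission object.
--     We only care about the 'values' array for your case.
--     """
--     submitted_values = submission.get("values", [])
--     email = None
--     submission_fields: Dict[str, Any] = {}
--
--     for f in submitted_values:
--         name = f.get("name")
--         val = f.get("value")
--         if name:
--             submission_fields[name] = val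
--         if name == "email":
--             email = val
--
--     return email, submission_fields
-- ===== SOURCE B (Python) =====
-- def extract_submission_email_and_fields(submission):
--     """
--     Extract email and form field values from a raw submission object.
--     Staged: collect the ordered distinct truthy field names first, then
--     resolve each name's value by a reverse scan (last occurrence wins).
--     """
--     values = submission.get("values", [])
--     names = list(dict.fromkeys(n for f in values if (n := f.get("name"))))
--
--     def last_value(name):
--         for f in reversed(values):
--             if f.get("name") == name:
--                 return f.get("value")
--         return None
--
--     fields = {n: last_value(n) for n in names}
--     return fields.get("email"), fields
-- ===== Notes on version B (the rewrite author's own statement) =====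
-- stated objective: alternative
-- what changed: B is staged: a first dedup pass collects the ordered distinct truthy field names, then each name's value (and the email) is resolved independently by a reverse scan for its last occurrence, instead of A's single pass threading a mutable dict and an email accumulator.
import Mathlib
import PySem

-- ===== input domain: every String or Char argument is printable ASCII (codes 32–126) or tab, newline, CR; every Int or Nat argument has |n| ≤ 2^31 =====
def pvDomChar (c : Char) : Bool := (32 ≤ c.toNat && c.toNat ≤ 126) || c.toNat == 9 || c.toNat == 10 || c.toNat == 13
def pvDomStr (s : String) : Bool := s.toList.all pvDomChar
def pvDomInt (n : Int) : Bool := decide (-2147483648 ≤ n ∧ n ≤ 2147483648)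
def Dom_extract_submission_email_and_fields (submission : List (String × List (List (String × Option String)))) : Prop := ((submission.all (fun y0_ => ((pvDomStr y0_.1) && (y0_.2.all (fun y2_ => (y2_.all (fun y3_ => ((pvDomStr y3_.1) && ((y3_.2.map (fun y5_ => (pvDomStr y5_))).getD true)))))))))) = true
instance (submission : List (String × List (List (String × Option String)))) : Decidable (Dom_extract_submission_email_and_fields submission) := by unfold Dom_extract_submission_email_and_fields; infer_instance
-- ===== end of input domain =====

-- B re-derives the result in stages (ordered dedup of names, then a reverse scan per name
-- for its last value) instead of A's single pass with a mutable dict and an email accumulator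
-- (objective: alternative — structurally different, not faster).


-- ===== PORT A =====
-- loop body of A: update (email, submission_fields) from one field dict f
def pvStepA (st : Option String × PySem.Dict String (Option String))
    (f : List (String × Option String)) : Option String × PySem.Dict String (Option String) :=
  let name : Option String := (PySem.Dict.mk f).getD "name" none
  let val : Option String := (PySem.Dict.mk f).getD "value" none
  let fields := match name with
    | some s => if s = "" then st.2 else st.2.insert s val
    | none => st.2
  let email := if name = some "email" then val else st.1
  (email, fields)

def extract_submission_email_and_fields (submission : List (String × List (List (String × Option String)))) : Option String × (List (String × Option String)) :=
  let submitted_values := (PySem.Dict.mk submission).getD "values" []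
  let st := submitted_values.foldl pvStepA (none, PySem.Dict.empty)
  (st.1, st.2.items)

-- ===== PORT B =====
-- B's helper last_value: scan reversed(values) for the first field named n
def pvFindVal : List (List (String × Option String)) → String → Option String
  | [], _ => none
  | f :: rest, n =>
      if (PySem.Dict.mk f).getD "name" none = some n
      then (PySem.Dict.mk f).getD "value" none
      else pvFindVal rest n

def pvLastVal (values : List (List (String × Option String))) (n : String) : Option String :=
  pvFindVal values.reverse n

-- the comprehension 'n for f in values if (n := f.get("name"))'
def pvTruthyNames (values : List (List (String × Option String))) : List String :=
  values.filterMap (fun f =>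
    match (PySem.Dict.mk f).getD "name" none with
    | some s => if s = "" then none else some s
    | none => none)

def extract_submission_email_and_fields_alt (submission : List (String × List (List (String × Option String)))) : Option String × (List (String × Option String)) :=
  let values := (PySem.Dict.mk submission).getD "values" []
  let names := PySem.List.dedup (pvTruthyNames values)
  let fields := names.foldl (fun d n => d.insert n (pvLastVal values n)) PySem.Dict.empty
  (fields.getD "email" none, fields.items)

-- ===== PRECONDITION & SPEC =====
def Spec_extract_submission_email_and_fields (submission : List (String × List (List (String × Option String)))) (out : Option String × (List (String × Option String))) : Prop := out = extract_submission_email_and_fields_alt submission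
instance (submission : List (String × List (List (String × Option String)))) (out : Option String × (List (String × Option String))) : Decidable (Spec_extract_submission_email_and_fields submission out) := by unfold Spec_extract_submission_email_and_fields; infer_instance

-- ===== CLAIM (what is proved, stated in full; the proofs are below) =====
def Claim_equal_extract_submission_email_and_fields : Prop := ∀ (submission : List (String × List (List (String × Option String)))), Dom_extract_submission_email_and_fields submission → Spec_extract_submission_email_and_fields submission (extract_submission_email_and_fields submission)

-- ===== LEMMAS AND PROOFS =====

-- dict component of A's loop body, in isolation (proof helper)
def pvDStep (d : PySem.Dict String (Option String))
    (f : List (String × Option String)) : PySem.Dict String (Option String) :=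
  match (PySem.Dict.mk f).getD "name" none with
  | some s => if s = "" then d else d.insert s ((PySem.Dict.mk f).getD "value" none)
  | none => d

-- invariant: A's fold from (d.getD "email" none, d) tracks the dict-only fold
theorem pv_fold_inv (l : List (List (String × Option String)))
    (d : PySem.Dict String (Option String)) :
    l.foldl pvStepA (d.getD "email" none, d)
      = ((l.foldl pvDStep d).getD "email" none, l.foldl pvDStep d) := by
  induction l generalizing d with
  | nil => rfl
  | cons f l ih =>
    simp only [List.foldl_cons]
    have hstep : pvStepA (d.getD "email" none, d) f
        = ((pvDStep d f).getD "email" none, pvDStep d f) := by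
      simp only [pvStepA, pvDStep]
      cases hn : (PySem.Dict.mk f).getD "name" none with
      | none => simp
      | some s =>
        by_cases hs : s = ""
        · subst hs; simp
        · simp only [if_neg hs, Option.some.injEq]
          rw [PySem.Dict.getD_insert]
          by_cases he : s = "email"
          · subst he; simp
          · simp [he, Ne.symm he]
    rw [hstep, ih]

theorem pv_tn_ne_empty (l : List (List (String × Option String)))
    (n : String) (h : n ∈ pvTruthyNames l) : n ≠ "" := by
  simp only [pvTruthyNames, List.mem_filterMap] at h
  obtain ⟨f, _, hf⟩ := h
  cases hname : (PySem.Dict.mk f).getD "name" none with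
  | none => simp [hname] at hf
  | some s =>
    simp only [hname] at hf
    by_cases hs : s = ""
    · simp [hs] at hf
    · simp only [if_neg hs, Option.some.injEq] at hf
      exact hf ▸ hs

theorem pv_lastVal_snoc (l : List (List (String × Option String)))
    (f : List (String × Option String)) (n : String) :
    pvLastVal (l ++ [f]) n
      = if (PySem.Dict.mk f).getD "name" none = some n
        then (PySem.Dict.mk f).getD "value" none else pvLastVal l n := by
  simp [pvLastVal, List.reverse_append, pvFindVal]

theorem pv_dedup_snoc (xs : List String) (x : String) :
    PySem.List.dedup (xs ++ [x])
      = if x ∈ xs then PySem.List.dedup xs else PySem.List.dedup xs ++ [x] := by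
  simp only [PySem.List.dedup_eq_ofList, PySem.Set.ofList_eq_foldl, List.foldl_append,
    List.foldl_cons, List.foldl_nil]
  rw [PySem.Set.add]
  by_cases h : x ∈ xs
  · rw [if_pos h, if_pos]
    rw [PySem.Set.contains]
    simp [← PySem.Set.ofList_eq_foldl, PySem.Set.mem_ofList, h]
  · rw [if_neg h, if_neg]
    rw [PySem.Set.contains]
    simp [← PySem.Set.ofList_eq_foldl, PySem.Set.mem_ofList, h]

theorem pv_itemsA (l : List (List (String × Option String))) :
    (l.foldl pvDStep PySem.Dict.empty).items
      = (PySem.List.dedup (pvTruthyNames l)).map (fun n => (n, pvLastVal l n)) := by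
  induction l using List.reverseRecOn with
  | nil => rfl
  | append_singleton l f ih =>
    rw [List.foldl_append, List.foldl_cons, List.foldl_nil]
    have hkeys : (l.foldl pvDStep PySem.Dict.empty).keys = PySem.List.dedup (pvTruthyNames l) := by
      simp only [PySem.Dict.keys, ih, List.map_map]
      simp [Function.comp_def]
    cases hn : (PySem.Dict.mk f).getD "name" none with
    | none =>
      have htn : pvTruthyNames (l ++ [f]) = pvTruthyNames l := by
        simp [pvTruthyNames, List.filterMap_append, hn]
      rw [show pvDStep (l.foldl pvDStep PySem.Dict.empty) f = l.foldl pvDStep PySem.Dict.empty from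
        by simp [pvDStep, hn], htn, ih]
      apply List.map_congr_left; intro n _
      rw [pv_lastVal_snoc]; simp [hn]
    | some s =>
      by_cases hs : s = ""
      · subst hs
        have htn : pvTruthyNames (l ++ [f]) = pvTruthyNames l := by
          simp [pvTruthyNames, List.filterMap_append, hn]
        rw [show pvDStep (l.foldl pvDStep PySem.Dict.empty) f = l.foldl pvDStep PySem.Dict.empty from
          by simp [pvDStep, hn], htn, ih]
        apply List.map_congr_left; intro n hnm
        have hne : n ≠ "" := pv_tn_ne_empty l n ((PySem.List.mem_dedup _ _).mp hnm)
        rw [pv_lastVal_snoc, if_neg]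
        rw [hn]; simp; exact fun h => hne h
      · have htn : pvTruthyNames (l ++ [f]) = pvTruthyNames l ++ [s] := by
          simp [pvTruthyNames, List.filterMap_append, hn, hs]
        have hstep : pvDStep (l.foldl pvDStep PySem.Dict.empty) f
            = (l.foldl pvDStep PySem.Dict.empty).insert s ((PySem.Dict.mk f).getD "value" none) := by
          simp [pvDStep, hn, hs]
        rw [hstep, htn, PySem.Dict.items_insert, pv_dedup_snoc]
        by_cases hmem : s ∈ pvTruthyNames l
        · have hcont : (l.foldl pvDStep PySem.Dict.empty).contains s = true := by
            rw [PySem.Dict.contains_eq_decide_mem_keys, hkeys]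
            simp [hmem]
          rw [if_pos hcont, if_pos hmem, ih, List.map_map]
          apply List.map_congr_left; intro n _
          simp only [Function.comp_apply]
          rw [pv_lastVal_snoc, hn]
          by_cases hns : n = s
          · subst hns; simp
          · simp [hns, Ne.symm hns]
        · have hcont : (l.foldl pvDStep PySem.Dict.empty).contains s = false := by
            rw [PySem.Dict.contains_eq_decide_mem_keys, hkeys]
            simp [hmem]
          rw [if_neg (by simp [hcont]), if_neg hmem, ih, List.map_append]
          congr 1
          · apply List.map_congr_left; intro n hnm
            have hns : n ≠ s := by
              intro h; exact hmem (h ▸ (PySem.List.mem_dedup _ _).mp hnm)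
            rw [pv_lastVal_snoc, if_neg]
            rw [hn]; simp; exact fun h => hns h.symm
          · simp [pv_lastVal_snoc, hn]

-- B's dict has the same items
theorem pv_itemsB (values : List (List (String × Option String))) :
    ((PySem.List.dedup (pvTruthyNames values)).foldl
        (fun d n => d.insert n (pvLastVal values n)) PySem.Dict.empty).items
      = (PySem.List.dedup (pvTruthyNames values)).map (fun n => (n, pvLastVal values n)) := by
  have h := PySem.Dict.items_foldl_insert_fresh (l := PySem.List.dedup (pvTruthyNames values))
      (k := fun n => n) (v := fun n => pvLastVal values n) (d := PySem.Dict.empty)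
      (by intro a _; exact PySem.Dict.contains_empty a)
      (by simp only [List.map_id_fun', id]; exact PySem.List.nodup_dedup (pvTruthyNames values))
  simpa using h

-- ===== VERDICT (by name: the statement is the Claim_ definition above) =====
theorem extract_submission_email_and_fields_spec : Claim_equal_extract_submission_email_and_fields := by
  intro submission _
  show _ = _
  simp only [extract_submission_email_and_fields, extract_submission_email_and_fields_alt]
  have h := pv_fold_inv ((PySem.Dict.mk submission).getD "values" []) PySem.Dict.empty
  simp only [PySem.Dict.getD_empty] at h
  rw [h]
  have hd : ((PySem.Dict.mk submission).getD "values" []).foldl pvDStep PySem.Dict.empty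
      = (PySem.List.dedup (pvTruthyNames ((PySem.Dict.mk submission).getD "values" []))).foldl
          (fun d n => d.insert n (pvLastVal ((PySem.Dict.mk submission).getD "values" []) n)) PySem.Dict.empty := by
    apply PySem.Dict.ext
    rw [pv_itemsA, pv_itemsB]
  rw [hd]
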